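-- pv_equiv track=rewrite | github.com/jenbrannstrom/rtbcat-platform | api/campaigns_router.py | _split_clusters_by_country
-- ===== SOURCE A (Python) =====
-- def _split_clusters_by_country(
--     clusters: dict[str, list[dict]],
--     creative_countries: dict[str, str],
-- ) -> dict[str, list[dict]]:
--     """Split clusters by country, creating 'domain:example.com:US' style keys."""
--     result: dict[str, list[dict]] = {}
--
--     for cluster_key, creatives in clusters.items():
--         # Group by country within this cluster
--         by_country: dict[str, list[dict]] = {}
--         for creative in creatives:
--             country = creative_countries.get(creative["id"], "UNKNOWN")
--             if country not in by_country:
--                 by_country[country] = []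
--             by_country[country].append(creative)
--
--         # Create new cluster keys with country suffix
--         for country, country_creatives in by_country.items():
--             new_key = f"{cluster_key}:{country}"
--             result[new_key] = country_creatives
--
--     return result
-- ===== SOURCE B (Python) =====
-- def _split_clusters_by_country(clusters, creative_countries):
--     """Split clusters by country, creating 'domain:example.com:US' style keys."""
--     result = {}
--     for cluster_key, creatives in clusters.items():
--         countries = [creative_countries.get(c["id"], "UNKNOWN") for c in creatives]
--         # distinct countries in first-seen order
--         seen = []
--         for co in countries:
--             if co not in seen:
--                 seen.append(co)
--         # each group is produced at once by a filter scan, no incremental appends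
--         for co in seen:
--             result[f"{cluster_key}:{co}"] = [c for c, cc in zip(creatives, countries) if cc == co]
--     return result
-- ===== Notes on version B (the rewrite author's own statement) =====
-- stated objective: alternative
-- what changed: B replaces A's incremental grouping dict (append each creative to by_country[country]) by a dedupe-then-filter scheme: it precomputes each creative's country, builds the first-seen list of distinct countries, and materialises every group in one filter pass over the cluster's creatives; no per-country accumulator lists are ever maintained.
import Mathlib
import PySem

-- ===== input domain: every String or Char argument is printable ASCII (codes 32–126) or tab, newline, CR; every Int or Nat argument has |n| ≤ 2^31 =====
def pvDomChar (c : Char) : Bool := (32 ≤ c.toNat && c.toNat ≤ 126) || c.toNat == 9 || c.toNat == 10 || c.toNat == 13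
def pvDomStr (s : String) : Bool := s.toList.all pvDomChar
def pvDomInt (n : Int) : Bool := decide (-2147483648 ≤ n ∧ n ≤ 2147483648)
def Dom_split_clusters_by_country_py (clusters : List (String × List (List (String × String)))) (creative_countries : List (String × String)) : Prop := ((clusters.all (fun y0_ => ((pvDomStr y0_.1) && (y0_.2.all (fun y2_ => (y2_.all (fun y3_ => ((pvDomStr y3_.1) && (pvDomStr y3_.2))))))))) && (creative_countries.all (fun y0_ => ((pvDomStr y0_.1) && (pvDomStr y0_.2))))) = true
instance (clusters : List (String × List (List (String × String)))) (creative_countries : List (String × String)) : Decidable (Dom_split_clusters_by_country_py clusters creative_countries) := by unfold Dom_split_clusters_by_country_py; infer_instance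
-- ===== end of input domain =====

-- B replaces A's incremental grouping dict (append each creative to by_country[country]) by a
-- dedupe-then-filter scheme: distinct countries in first-seen order, then each group materialised
-- by one filter pass over the cluster's creatives (objective: alternative).

-- country = creative_countries.get(creative["id"], "UNKNOWN"); the same expression occurs in both
-- Pythons.  When the creative has no "id" key Python raises KeyError (excluded by Pre_);
-- the port returns "UNKNOWN" there, nothing is claimed about such inputs.
def pvCountry (creative_countries : List (String × String)) (cr : List (String × String)) : String :=
  match (PySem.Dict.mk cr).get? "id" with
  | some i => ((PySem.Dict.mk creative_countries).get? i).getD "UNKNOWN"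
  | none => "UNKNOWN"

-- ===== PORT A =====
def split_clusters_by_country_py (clusters : List (String × List (List (String × String)))) (creative_countries : List (String × String)) : List (String × List (List (String × String))) :=
  (clusters.foldl
    (fun result p =>
      -- by_country: group by country within this cluster
      let by_country : PySem.Dict String (List (List (String × String))) :=
        p.2.foldl
          (fun bc cr =>
            let country := pvCountry creative_countries cr
            let bc := if bc.contains country then bc else bc.insert country []
            bc.insert country (bc.getD country [] ++ [cr]))
          PySem.Dict.empty
      -- create new cluster keys with country suffix
      by_country.items.foldl (fun result q => result.insert (p.1 ++ ":" ++ q.1) q.2) result)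
    PySem.Dict.empty).items

-- ===== PORT B =====
def split_clusters_by_country_py_alt (clusters : List (String × List (List (String × String)))) (creative_countries : List (String × String)) : List (String × List (List (String × String))) :=
  (clusters.foldl
    (fun result p =>
      -- countries = [creative_countries.get(c["id"], "UNKNOWN") for c in creatives]
      let countries := p.2.map (pvCountry creative_countries)
      -- seen: distinct countries in first-seen order (hand-written dedup loop in Source B)
      let seen := countries.foldl (fun s co => if s.contains co then s else s ++ [co]) []
      -- each group produced at once by a filter over zip(creatives, countries)
      seen.foldl
        (fun result co =>
          result.insert (p.1 ++ ":" ++ co)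
            (((p.2.zip countries).filter (fun q => q.2 == co)).map Prod.fst))
        result)
    PySem.Dict.empty).items

-- ===== PRECONDITION & SPEC =====
-- Pre_ excludes exactly the inputs on which Python A raises KeyError: a creative without an "id"
-- key.  On every input A returns, Pre_ holds.
def Pre_split_clusters_by_country_py (clusters : List (String × List (List (String × String)))) (creative_countries : List (String × String)) : Prop :=
  clusters.all (fun p => p.2.all (fun cr => (PySem.Dict.mk cr).contains "id")) = true
instance (clusters : List (String × List (List (String × String)))) (creative_countries : List (String × String)) : Decidable (Pre_split_clusters_by_country_py clusters creative_countries) := by unfold Pre_split_clusters_by_country_py; infer_instance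

def pvWitness_split_clusters_by_country_py : (List (String × List (List (String × String)))) × (List (String × String)) :=
  ([("a", [[("id", "x")], [("id", "z")]]), ("b", [[("id", "y")]])], [("x", "US"), ("y", "DE")])

def Spec_split_clusters_by_country_py (clusters : List (String × List (List (String × String)))) (creative_countries : List (String × String)) (out : List (String × List (List (String × String)))) : Prop := out = split_clusters_by_country_py_alt clusters creative_countries
instance (clusters : List (String × List (List (String × String)))) (creative_countries : List (String × String)) (out : List (String × List (List (String × String)))) : Decidable (Spec_split_clusters_by_country_py clusters creative_countries out) := by unfold Spec_split_clusters_by_country_py; infer_instance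

-- ===== CLAIM =====
def Claim_equal_split_clusters_by_country_py : Prop := ∀ (clusters : List (String × List (List (String × String)))) (creative_countries : List (String × String)), Dom_split_clusters_by_country_py clusters creative_countries → Pre_split_clusters_by_country_py clusters creative_countries → Spec_split_clusters_by_country_py clusters creative_countries (split_clusters_by_country_py clusters creative_countries)

-- ===== LEMMAS AND PROOFS =====

-- one grouping step of A collapses to dict.modify
theorem pv_stepA_modify (bc : PySem.Dict String (List (List (String × String)))) (c : String) (cr : List (String × String)) :
    ((if bc.contains c then bc else bc.insert c []).insert c
      ((if bc.contains c then bc else bc.insert c []).getD c [] ++ [cr]))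
    = bc.modify c [] (fun l => l ++ [cr]) := by
  by_cases h : bc.contains c = true
  · simp [h, PySem.Dict.modify]
  · have h' : bc.contains c = false := by simpa using h
    simp [h', PySem.Dict.modify, PySem.Dict.insert_insert_self, PySem.Dict.getD_insert_self,
      PySem.Dict.getD_of_not_contains _ _ h']

theorem pv_not_contains_of_not_mem {κ ν : Type} [BEq κ] [LawfulBEq κ] {d : PySem.Dict κ ν} {k : κ}
    (h : k ∉ d.keys) : d.contains k = false := by
  rcases hc : d.contains k with _ | _
  · rfl
  · exact absurd ((PySem.Dict.contains_iff_mem_keys d k).mp hc) h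

-- A's grouping loop from the empty dict yields one entry per first-seen key, filter-valued
theorem pv_groupfold {β : Type} (K : β → String) (crs : List β) :
    (crs.foldl (fun d cr => d.modify (K cr) [] (fun l => l ++ [cr])) PySem.Dict.empty).items
      = (PySem.Set.ofList (crs.map K)).map
          (fun c => (c, crs.filter (fun cr => K cr == c))) := by
  set r : PySem.Dict String (List β) := PySem.Dict.empty with hr
  have hndr : r.keys.Nodup := by simp [hr, PySem.Dict.empty, PySem.Dict.keys]
  have hfold : crs.foldl (fun d cr => d.modify (K cr) [] (fun l => l ++ [cr])) r
      = (crs.map (fun cr => (K cr, cr))).foldl (fun d p => d.modify p.1 [] (fun l => l ++ [p.2])) r := by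
    rw [List.foldl_map]
  have hkeys : (crs.foldl (fun d cr => d.modify (K cr) [] (fun l => l ++ [cr])) r).keys
      = PySem.Set.ofList (crs.map K) := by
    rw [PySem.Dict.keys_foldl_modify_key crs K [] (fun _ cr => fun l => l ++ [cr]) r]
    have : r.keys = [] := by simp [hr, PySem.Dict.empty, PySem.Dict.keys]
    rw [this]
    rfl
  have hnd' : (crs.foldl (fun d cr => d.modify (K cr) [] (fun l => l ++ [cr])) r).keys.Nodup :=
    PySem.Dict.nodup_keys_foldl_modify_key crs K [] (fun _ cr => fun l => l ++ [cr]) r hndr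
  have hgetD : ∀ c, (crs.foldl (fun d cr => d.modify (K cr) [] (fun l => l ++ [cr])) r).getD c []
      = crs.filter (fun cr => K cr == c) := by
    intro c
    rw [hfold, PySem.Dict.getD_foldl_modify_append]
    have h0 : r.getD c [] = [] := by
      apply PySem.Dict.getD_of_not_contains
      apply pv_not_contains_of_not_mem
      simp [hr, PySem.Dict.empty, PySem.Dict.keys]
    rw [h0, List.nil_append, List.filter_map, List.map_map]
    exact List.map_id' _
  rw [PySem.Dict.items_eq_map_keys _ hnd' [], hkeys]
  apply List.map_congr_left
  intro c _
  rw [hgetD]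

-- Source B's hand-written dedup loop is PySem.Set.ofList
theorem pv_seen_eq_ofList (l : List String) :
    l.foldl (fun s co => if s.contains co then s else s ++ [co]) [] = PySem.Set.ofList l := by
  rfl

-- zip-with-mapped-keys filter = direct filter
theorem pv_zip_filter {β : Type} (K : β → String) (crs : List β) (c : String) :
    ((crs.zip (crs.map K)).filter (fun q => q.2 == c)).map Prod.fst
      = crs.filter (fun cr => K cr == c) := by
  induction crs with
  | nil => rfl
  | cons x t ih =>
    simp only [List.map_cons, List.zip_cons_cons, List.filter_cons]
    by_cases h : (K x == c) = true
    · simp [h, ih]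
    · simp only [h]
      simpa [h] using ih

-- the two per-cluster step functions are EQUAL as functions on the accumulator dict
theorem pv_step_eq (creative_countries : List (String × String)) :
    (fun (result : PySem.Dict String (List (List (String × String)))) (p : String × List (List (String × String))) =>
      let by_country : PySem.Dict String (List (List (String × String))) :=
        p.2.foldl
          (fun bc cr =>
            let country := pvCountry creative_countries cr
            let bc := if bc.contains country then bc else bc.insert country []
            bc.insert country (bc.getD country [] ++ [cr]))
          PySem.Dict.empty
      by_country.items.foldl (fun result q => result.insert (p.1 ++ ":" ++ q.1) q.2) result)
    = (fun (result : PySem.Dict String (List (List (String × String)))) (p : String × List (List (String × String))) =>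
      let countries := p.2.map (pvCountry creative_countries)
      let seen := countries.foldl (fun s co => if s.contains co then s else s ++ [co]) []
      seen.foldl
        (fun result co =>
          result.insert (p.1 ++ ":" ++ co)
            (((p.2.zip countries).filter (fun q => q.2 == co)).map Prod.fst))
        result) := by
  funext result p
  simp only []
  have hA : (fun (bc : PySem.Dict String (List (List (String × String)))) cr =>
      let country := pvCountry creative_countries cr
      let bc := if bc.contains country then bc else bc.insert country []
      bc.insert country (bc.getD country [] ++ [cr]))
      = fun bc cr => bc.modify (pvCountry creative_countries cr) [] (fun l => l ++ [cr]) := by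
    funext bc cr
    exact pv_stepA_modify bc (pvCountry creative_countries cr) cr
  rw [hA, pv_groupfold (pvCountry creative_countries) p.2, pv_seen_eq_ofList, List.foldl_map]
  have hfun : (fun (r : PySem.Dict String (List (List (String × String)))) c =>
      r.insert (p.1 ++ ":" ++ c) (p.2.filter (fun cr => pvCountry creative_countries cr == c)))
      = fun r c => r.insert (p.1 ++ ":" ++ c)
          (((p.2.zip (p.2.map (pvCountry creative_countries))).filter (fun q => q.2 == c)).map Prod.fst) := by
    funext r c
    rw [pv_zip_filter (pvCountry creative_countries) p.2 c]
  rw [hfun]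

-- ===== VERDICT =====
theorem split_clusters_by_country_py_spec : Claim_equal_split_clusters_by_country_py := by
  intro clusters creative_countries _hdom _hpre
  unfold Spec_split_clusters_by_country_py
  unfold split_clusters_by_country_py split_clusters_by_country_py_alt
  rw [pv_step_eq creative_countries]
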